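-- pv_equiv track=rewrite | github.com/CalmNguyen/AI_MAP_BFS_DFS_GBFS_AStar | map/GBFS.py | TinhHn
-- ===== SOURCE A (Python) =====
-- def TinhHn(matrix,end):
--     new=matrix.copy()
--     for i in range(len(matrix)):
--         new[i]=matrix[i].copy()
--     for i in range(len(matrix)):
--         for j in range(len(new[0])):
--             new[i][j]= int(abs(end[0]-i)+abs(end[1]-j))
--     return new
-- ===== SOURCE B (Python) =====
-- def TinhHn(matrix, end):
--     out = []
--     if not matrix:
--         return out
--     w = len(matrix[0])
--     v = abs(end[0]) + abs(end[1])  # distance at cell (0, 0)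
--     for i in range(len(matrix)):
--         row = []
--         x = v
--         for j in range(w):
--             row.append(x)
--             x += -1 if j < end[1] else 1
--         out.append(row)
--         v += -1 if i < end[0] else 1
--     return out
-- ===== Notes on version B (the rewrite author's own statement) =====
-- stated objective: alternative
-- what changed: B builds the grid by a wavefront recurrence: it starts from the corner value abs(end[0])+abs(end[1]) and derives every cell from its left neighbour (+/-1) and every row start from the previous row's start (+/-1), never computing an absolute difference per cell, instead of A's copy-then-overwrite nested index loops that evaluate two abs() per cell.
-- outside the precondition, e.g. on TinhHn([[1], [2, 3]], (0, 0)): A returns [[0], [1, 3]], B returns [[0], [1]]; on TinhHn([[1, 2], [3]], (0, 0)): A raises IndexError, B returns [[0, 1], [1, 2]]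
import Mathlib
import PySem

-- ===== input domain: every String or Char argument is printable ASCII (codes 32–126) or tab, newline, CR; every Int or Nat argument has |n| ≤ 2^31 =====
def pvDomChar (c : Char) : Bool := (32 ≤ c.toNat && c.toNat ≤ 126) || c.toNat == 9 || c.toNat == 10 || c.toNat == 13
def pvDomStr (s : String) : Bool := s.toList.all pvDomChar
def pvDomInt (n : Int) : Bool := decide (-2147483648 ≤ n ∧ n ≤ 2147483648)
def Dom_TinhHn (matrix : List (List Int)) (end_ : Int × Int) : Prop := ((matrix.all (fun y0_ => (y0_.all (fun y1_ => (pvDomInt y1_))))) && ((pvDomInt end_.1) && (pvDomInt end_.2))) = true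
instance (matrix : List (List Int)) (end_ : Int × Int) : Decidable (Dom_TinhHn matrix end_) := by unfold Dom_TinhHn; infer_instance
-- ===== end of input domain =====

-- B replaces A's per-cell abs() computations by a wavefront recurrence (start from the
-- corner value, each cell from its left neighbour by +/-1, each row start from the
-- previous row's start by +/-1); objective: an alternative algorithm of the same cost.

-- ===== PORT A =====
-- literal transliteration: new = matrix.copy(); per-row copy loop; then the nested
-- index loops overwriting new[i][j], with the inner bound re-reading len(new[0]).
def TinhHn (matrix : List (List Int)) (end_ : Int × Int) : List (List Int) :=
  let new0 := matrix
  let new1 := (List.range matrix.length).foldl (fun n i => n.set i (matrix.getD i [])) new0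
  (List.range matrix.length).foldl (fun n i =>
    (List.range (n.headD []).length).foldl (fun n2 j =>
      n2.set i ((n2.getD i []).set j (|end_.1 - (i : Int)| + |end_.2 - (j : Int)|))) n) new1

-- ===== PORT B =====
-- inner loop of Source B: state (x, row); row.append(x); x += -1 if j < end[1] else 1
def pvRowB (e1 : Int) (w : Nat) (v : Int) : List Int :=
  ((List.range w).foldl
    (fun (s : Int × List Int) (j : Nat) => (s.1 + (if (j : Int) < e1 then -1 else 1), s.2 ++ [s.1]))
    (v, [])).2

def TinhHn_alt (matrix : List (List Int)) (end_ : Int × Int) : List (List Int) :=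
  if matrix = [] then []
  else
    let w := (matrix.headD []).length
    (((List.range matrix.length).foldl
        (fun (s : Int × List (List Int)) (i : Nat) =>
          (s.1 + (if (i : Int) < end_.1 then -1 else 1), s.2 ++ [pvRowB end_.2 w s.1]))
        (|end_.1| + |end_.2|, [])).2)

-- ===== PRECONDITION & SPEC =====
-- Pre_ restricts to the function's natural domain, rectangular matrices: on a ragged
-- list of lists A raises IndexError when a row is shorter than row 0, and when a row is
-- longer than row 0 it returns a mix of distances and leftover input entries (it writes
-- only len(new[0]) cells per row) — neither value is specified for a non-matrix input.
def Pre_TinhHn (matrix : List (List Int)) (end_ : Int × Int) : Prop :=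
  ∀ row ∈ matrix, row.length = (matrix.headD []).length
instance (matrix : List (List Int)) (end_ : Int × Int) : Decidable (Pre_TinhHn matrix end_) := by
  unfold Pre_TinhHn; infer_instance
def pvWitness_TinhHn : List (List Int) × (Int × Int) := ([[0, 0], [0, 0]], (1, 1))
def Spec_TinhHn (matrix : List (List Int)) (end_ : Int × Int) (out : List (List Int)) : Prop := out = TinhHn_alt matrix end_
instance (matrix : List (List Int)) (end_ : Int × Int) (out : List (List Int)) : Decidable (Spec_TinhHn matrix end_ out) := by unfold Spec_TinhHn; infer_instance

-- ===== CLAIM (what is proved, stated in full; the proofs are below) =====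
def Claim_equal_TinhHn : Prop := ∀ (matrix : List (List Int)) (end_ : Int × Int), Dom_TinhHn matrix end_ → Pre_TinhHn matrix end_ → Spec_TinhHn matrix end_ (TinhHn matrix end_)

-- ===== LEMMAS AND PROOFS =====

theorem pv_set_getD_self {α : Type} (xs : List α) (i : Nat) (d : α) :
    xs.set i (xs.getD i d) = xs := by
  by_cases h : i < xs.length
  · rw [List.getD_eq_getElem _ _ h, List.set_getElem_self]
  · exact List.set_eq_of_length_le (by omega)

theorem pv_copy_foldl (xs : List (List Int)) (l : List Nat) :
    l.foldl (fun a i => a.set i (xs.getD i [])) xs = xs := by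
  induction l with
  | nil => rfl
  | cons j t ih =>
    rw [List.foldl_cons, pv_set_getD_self]
    exact ih

theorem pv_row_foldl (f : Nat → Int) :
    ∀ (n : Nat) (xs : List Int), n ≤ xs.length →
      (List.range n).foldl (fun l j => l.set j (f j)) xs = (List.range n).map f ++ xs.drop n := by
  intro n
  induction n with
  | zero => simp
  | succ n ih =>
    intro xs h
    rw [List.range_succ, List.foldl_append, ih xs (by omega)]
    simp only [List.foldl_cons, List.foldl_nil]
    have hlen : ((List.range n).map f).length = n := by simp
    have hn : n < xs.length := by omega
    rw [List.set_append_right _ _ (le_of_eq hlen), hlen, Nat.sub_self,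
        List.drop_eq_getElem_cons hn, List.set_cons_zero, List.map_append]
    simp

theorem pv_inner_lift (v : Nat → Int) (i : Nat) :
    ∀ (L : List Nat) (n : List (List Int)), i < n.length →
      L.foldl (fun n2 j => n2.set i ((n2.getD i []).set j (v j))) n
        = n.set i (L.foldl (fun r j => r.set j (v j)) (n.getD i [])) := by
  intro L
  induction L with
  | nil => intro n h; exact (pv_set_getD_self n i []).symm
  | cons j t ih =>
    intro n h
    have h' : i < (n.set i ((n.getD i []).set j (v j))).length := by simpa using h
    rw [List.foldl_cons, ih _ h']
    rw [List.getD_eq_getElem _ _ h'] at *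
    simp [List.getElem_set_self, List.set_set]

-- the per-row output of both programs
def pvRow (end_ : Int × Int) (w i : Nat) : List Int :=
  (List.range w).map (fun (j : Nat) => |end_.1 - (i : Int)| + |end_.2 - (j : Int)|)

theorem pv_outer (matrix : List (List Int)) (end_ : Int × Int)
    (rect : ∀ row ∈ matrix, row.length = (matrix.headD []).length) :
    ∀ m, m ≤ matrix.length →
      (List.range m).foldl (fun n i =>
          (List.range (n.headD []).length).foldl (fun n2 j =>
            n2.set i ((n2.getD i []).set j (|end_.1 - (i : Int)| + |end_.2 - (j : Int)|))) n) matrix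
        = (List.range m).map (pvRow end_ (matrix.headD []).length) ++ matrix.drop m := by
  set w := (matrix.headD []).length with hw
  intro m
  induction m with
  | zero => simp
  | succ m ih =>
    intro h
    rw [List.range_succ, List.foldl_append, ih (by omega)]
    set S := (List.range m).map (pvRow end_ w) ++ matrix.drop m with hS
    have hSlen : S.length = matrix.length := by simp [hS]; omega
    have hm : m < matrix.length := by omega
    have hmS : m < S.length := by omega
    -- the inner bound: row 0 of the current state has length w
    have hhead : (S.headD []).length = w := by
      cases m with
      | zero =>
        simp only [hS, List.range_zero, List.map_nil, List.nil_append, List.drop_zero]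
        exact hw.symm
      | succ k =>
        have hcons : S = pvRow end_ w 0 ::
            ((List.map (pvRow end_ w) ((List.range k).map Nat.succ)) ++ matrix.drop (k + 1)) := by
          rw [hS, List.range_succ_eq_map]
          simp
        rw [hcons]
        simp [pvRow]
    have hA : (List.map (pvRow end_ w) (List.range m)).length = m := by simp
    have hget : S.getD m [] = matrix[m] := by
      rw [hS, List.getD_append_right _ _ _ _ (le_of_eq hA), hA, Nat.sub_self,
          List.drop_eq_getElem_cons hm, List.getD_cons_zero]
    have hrowlen : (matrix[m]).length = w := rect _ (List.getElem_mem hm)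
    simp only [List.foldl_cons, List.foldl_nil]
    rw [hhead, pv_inner_lift _ m _ _ hmS, hget,
        pv_row_foldl _ w matrix[m] (le_of_eq hrowlen.symm)]
    have hdrop : matrix[m].drop w = [] := by
      rw [← hrowlen]; exact List.drop_length
    rw [hdrop, List.append_nil]
    have : S.set m ((List.range w).map (fun (j : Nat) => |end_.1 - (m : Int)| + |end_.2 - (j : Int)|))
        = (List.range m).map (pvRow end_ w) ++ (pvRow end_ w m :: matrix.drop (m + 1)) := by
      rw [hS, List.set_append_right _ _ (le_of_eq hA), hA, Nat.sub_self,
          List.drop_eq_getElem_cons hm, List.set_cons_zero]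
      rfl
    rw [this, List.map_append]
    simp

-- the step of the wavefront recurrence: |e - j| followed by +/-1 is |e - (j+1)|
theorem pv_abs_step (e : Int) (n : Nat) :
    |e - (n : Int)| + (if (n : Int) < e then -1 else 1) = |e - ((n : Int) + 1)| := by
  split_ifs with h
  · rw [abs_of_pos (by omega), abs_of_nonneg (by omega)]; omega
  · rw [abs_of_nonpos (by omega), abs_of_nonpos (by omega)]; omega

-- invariant of both of B's accumulator loops (inner and outer at once, via f)
theorem pv_wave {α : Type} (e : Int) (f : Int → α) (c : Int) :
    ∀ (n : Nat) (acc : List α),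
      (List.range n).foldl
          (fun (s : Int × List α) (j : Nat) => (s.1 + (if (j : Int) < e then -1 else 1), s.2 ++ [f s.1]))
          (c + |e|, acc)
        = (c + |e - (n : Int)|,
           acc ++ (List.range n).map (fun (j : Nat) => f (c + |e - (j : Int)|))) := by
  intro n
  induction n with
  | zero => simp
  | succ n ih =>
    intro acc
    rw [List.range_succ, List.foldl_append, ih]
    simp only [List.foldl_cons, List.foldl_nil, List.map_append, List.map_cons,
      List.map_nil, List.append_assoc]
    refine Prod.ext ?_ ?_
    · show c + |e - (n : Int)| + (if (n : Int) < e then -1 else 1) = c + |e - ((n + 1 : Nat) : Int)|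
      rw [add_assoc, pv_abs_step]; push_cast; ring_nf
    · simp

theorem pvRowB_eq (e1 : Int) (w : Nat) (c : Int) :
    pvRowB e1 w (c + |e1|) = (List.range w).map (fun (j : Nat) => c + |e1 - (j : Int)|) := by
  unfold pvRowB
  rw [pv_wave e1 (fun x => x) c w []]
  simp

theorem pv_alt_eq (matrix : List (List Int)) (end_ : Int × Int) (hne : matrix ≠ []) :
    TinhHn_alt matrix end_
      = (List.range matrix.length).map (pvRow end_ (matrix.headD []).length) := by
  unfold TinhHn_alt
  dsimp only
  rw [if_neg hne]
  have hstart : |end_.1| + |end_.2| = |end_.2| + |end_.1| := by ring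
  rw [hstart, pv_wave end_.1 (fun v => pvRowB end_.2 (matrix.headD []).length v) |end_.2|]
  simp only [List.nil_append]
  apply List.map_congr_left
  intro i _
  have : |end_.2| + |end_.1 - (i : Int)| = |end_.1 - (i : Int)| + |end_.2| := by ring
  rw [this, pvRowB_eq]
  unfold pvRow
  apply List.map_congr_left
  intro j _
  ring

-- ===== VERDICT (by name: the statement is the Claim_ definition above) =====
theorem TinhHn_spec : Claim_equal_TinhHn := by
  intro matrix end_ _ hpre
  unfold Spec_TinhHn TinhHn
  dsimp only
  by_cases hne : matrix = []
  · subst hne; rfl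
  · rw [pv_copy_foldl, pv_outer matrix end_ hpre matrix.length (le_refl _),
        List.drop_length, List.append_nil, pv_alt_eq matrix end_ hne]
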